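-- pv_equiv track=rewrite | github.com/matt-harvey/jewel | tools/jewel_log_to_csv.py | log_string_to_dict_list
-- ===== SOURCE A (Python) =====
-- import collections
--
-- def log_string_to_dict_list(log_string):
--     """
--     Take a single string representing the contents of a jewel::Log file,
--     and return a list of OrderedDicts representing the logging events in the
--     log file.
--     """
--     record_separator = "{RECORD}"
--     field_separator = "{FIELD}"
--     raw_records = log_string.split(record_separator)
--     ret = []
--     for raw_record in raw_records:
--         raw_record = raw_record.strip()
--         if len(raw_record) == 0:
--             continue
--         raw_record = raw_record.split(field_separator)
--         record = collections.OrderedDict()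
--         for raw_cell in raw_record:
--             raw_cell = raw_cell.strip()
--             if len(raw_cell) == 0:
--                 continue
--             assert raw_cell[0] == '['
--             field_name = []
--             field_contents = []
--             in_contents = False
--             for char in raw_cell:
--                 if char == ']':
--                     in_contents = True
--                     continue
--                 if char != '[' and not in_contents:
--                     field_name.append(char)
--                 elif in_contents:
--                     field_contents.append(char)
--             field_name = "".join(field_name)
--             field_contents = "".join(field_contents)
--             record[field_name] = field_contents
--         ret.append(record)
--     return ret
-- ===== SOURCE B (Python) =====
-- import collections
--
-- _RECORD_SEP = "{RECORD}"
-- _FIELD_SEP = "{FIELD}"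
--
-- def _parse_cell(cell):
--     # name = part before the first ']' with every '[' removed;
--     # contents = part after the first ']' with every ']' removed.
--     name_part, _, rest = cell.partition(']')
--     return name_part.replace('[', ''), rest.replace(']', '')
--
-- def _parse_record(raw_record):
--     record = collections.OrderedDict()
--     for raw_cell in raw_record.split(_FIELD_SEP):
--         cell = raw_cell.strip()
--         if cell:
--             assert cell[0] == '['
--             name, contents = _parse_cell(cell)
--             record[name] = contents
--     return record
--
-- def log_string_to_dict_list(log_string):
--     return [_parse_record(r.strip())
--             for r in log_string.split(_RECORD_SEP) if r.strip()]
-- ===== Notes on version B (the rewrite author's own statement) =====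
-- stated objective: simpler
-- what changed: The inner char-by-char state machine that parses a [name]contents cell is replaced by partition(']') plus replace ('[' stripped from the name part, ']' from the contents part), and the outer loop becomes a list comprehension over small helper functions.
-- outside the precondition, e.g. on log_string_to_dict_list(']'): A raises AssertionError, B raises AssertionError
import Mathlib
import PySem

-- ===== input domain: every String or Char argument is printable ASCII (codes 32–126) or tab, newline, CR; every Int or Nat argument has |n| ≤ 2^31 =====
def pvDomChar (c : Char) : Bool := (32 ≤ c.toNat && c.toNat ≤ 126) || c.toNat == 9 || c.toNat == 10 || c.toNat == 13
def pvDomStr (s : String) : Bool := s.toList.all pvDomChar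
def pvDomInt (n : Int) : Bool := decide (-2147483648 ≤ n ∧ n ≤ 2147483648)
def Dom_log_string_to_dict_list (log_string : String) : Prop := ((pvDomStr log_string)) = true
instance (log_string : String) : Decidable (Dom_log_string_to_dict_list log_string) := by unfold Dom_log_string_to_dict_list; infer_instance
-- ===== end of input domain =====

-- B replaces A's char-by-char state machine for a cell with partition(']') + replace, and builds the
-- record list by a comprehension over helper functions (objective: simpler).


-- ===== PORT A =====
-- the inner 'for char in raw_cell' state machine: state = (field_name, field_contents, in_contents)
def pvStepA (acc : List Char × List Char × Bool) (char : Char) : List Char × List Char × Bool :=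
  if char = ']' then (acc.1, acc.2.1, true)
  else if char ≠ '[' ∧ acc.2.2 = false then (acc.1 ++ [char], acc.2.1, acc.2.2)
  else if acc.2.2 then (acc.1, acc.2.1 ++ [char], acc.2.2)
  else acc

def log_string_to_dict_list (log_string : String) : List (List (String × String)) :=
  let raw_records := PySem.Chars.splitOn log_string.toList "{RECORD}".toList
  raw_records.foldl (fun ret raw_record =>
    let r := PySem.Chars.strip raw_record
    if r.length = 0 then ret
    else
      let cells := PySem.Chars.splitOn r "{FIELD}".toList
      let record := cells.foldl (fun (record : PySem.Dict String String) raw_cell =>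
        let c := PySem.Chars.strip raw_cell
        if c.length = 0 then record
        else
          -- the assert on the cell's first char: Pre_ excludes exactly the inputs where it fails (AssertionError)
          let st := c.foldl pvStepA (([] : List Char), ([] : List Char), false)
          record.insert (String.ofList st.1) (String.ofList st.2.1)) PySem.Dict.empty
      ret ++ [record.items]) []

-- ===== PORT B =====
-- _parse_cell: cell.partition(']') is ported by hand as takeWhile/dropWhile at the first ']'
-- (exact: rest = [] when ']' is absent); str.replace is PySem.Chars.replace.
def pvParseCell (cell : List Char) : String × String :=
  let name_part := cell.takeWhile (· ≠ ']')
  let rest := (cell.dropWhile (· ≠ ']')).drop 1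
  (String.ofList (PySem.Chars.replace name_part "[".toList []),
   String.ofList (PySem.Chars.replace rest "]".toList []))

def pvParseRecord (raw_record : List Char) : List (String × String) :=
  ((PySem.Chars.splitOn raw_record "{FIELD}".toList).foldl
    (fun (record : PySem.Dict String String) raw_cell =>
      let cell := PySem.Chars.strip raw_cell
      if cell = [] then record
      else
        -- the same assert as in Source B; Pre_ excludes the failing inputs
        let nc := pvParseCell cell
        record.insert nc.1 nc.2) PySem.Dict.empty).items

def log_string_to_dict_list_alt (log_string : String) : List (List (String × String)) :=
  ((PySem.Chars.splitOn log_string.toList "{RECORD}".toList).filter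
      (fun r => PySem.Chars.strip r != [])).map
    (fun r => pvParseRecord (PySem.Chars.strip r))

-- ===== PRECONDITION & SPEC =====
-- Pre_ excludes exactly the inputs where the assert in both programs fails
-- (some stripped nonempty cell does not start with '['): there Python A raises AssertionError.
def Pre_log_string_to_dict_list (log_string : String) : Prop :=
  ((PySem.Chars.splitOn log_string.toList "{RECORD}".toList).all fun r =>
    (PySem.Chars.splitOn (PySem.Chars.strip r) "{FIELD}".toList).all fun cell =>
      let c := PySem.Chars.strip cell
      c.isEmpty || c.head? == some '[') = true
instance (log_string : String) : Decidable (Pre_log_string_to_dict_list log_string) := by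
  unfold Pre_log_string_to_dict_list; infer_instance

def pvWitness_log_string_to_dict_list : String :=
  "[id]1{FIELD}[msg]hello{RECORD}[id]2{FIELD}[msg]bye"

def Spec_log_string_to_dict_list (log_string : String) (out : List (List (String × String))) : Prop := out = log_string_to_dict_list_alt log_string
instance (log_string : String) (out : List (List (String × String))) : Decidable (Spec_log_string_to_dict_list log_string out) := by unfold Spec_log_string_to_dict_list; infer_instance

-- ===== CLAIM (what is proved, stated in full; the proofs are below) =====
def Claim_equal_log_string_to_dict_list : Prop := ∀ (log_string : String), Dom_log_string_to_dict_list log_string → Pre_log_string_to_dict_list log_string → Spec_log_string_to_dict_list log_string (log_string_to_dict_list log_string)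

-- ===== LEMMAS AND PROOFS =====

-- replace with a single-char old and empty new removes every occurrence
theorem pv_replace_go_filter (x : Char) :
    ∀ (fuel : Nat) (l acc : List Char), l.length ≤ fuel →
      PySem.Chars.replace.go [x] [] fuel l acc = acc.reverse ++ l.filter (· ≠ x) := by
  intro fuel
  induction fuel with
  | zero =>
      intro l acc h
      have : l = [] := List.eq_nil_of_length_eq_zero (Nat.le_zero.mp h)
      subst this
      simp [PySem.Chars.replace.go]
  | succ n ih =>
      intro l acc h
      cases l with
      | nil => simp [PySem.Chars.replace.go]
      | cons c t =>
          by_cases hc : c = x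
          · subst hc
            have hp : List.isPrefixOf [c] (c :: t) = true := by
              simp [List.isPrefixOf]
            rw [PySem.Chars.replace.go]
            simp only [hp, if_pos, List.length_cons, List.length_nil, List.drop_succ_cons,
              List.drop_zero, List.reverse_nil, List.nil_append]
            rw [ih t acc (by simpa using Nat.le_of_succ_le_succ h)]
            simp
          · have hp : List.isPrefixOf [x] (c :: t) = false := by
              simp [List.isPrefixOf]; intro hx; exact absurd hx.symm hc
            rw [PySem.Chars.replace.go]
            simp only [hp]
            rw [ih t (c :: acc) (by simpa using Nat.le_of_succ_le_succ h)]
            simp [hc]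

theorem pv_replace_filter (x : Char) (l : List Char) :
    PySem.Chars.replace l [x] [] = l.filter (· ≠ x) := by
  rw [PySem.Chars.replace]
  simp [pv_replace_go_filter x l.length l [] (le_refl _)]

-- A's state machine in the in_contents = true state appends every non-']' char to contents
theorem pv_stepA_true (cs : List Char) : ∀ (n c : List Char),
    cs.foldl pvStepA (n, c, true) = (n, c ++ cs.filter (· ≠ ']'), true) := by
  induction cs with
  | nil => intro n c; simp
  | cons ch t ih =>
      intro n c
      by_cases hch : ch = ']'
      · subst hch
        have hs : pvStepA (n, c, true) ']' = (n, c, true) := by simp [pvStepA]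
        rw [List.foldl_cons, hs, ih]
        simp
      · have hs : pvStepA (n, c, true) ch = (n, c ++ [ch], true) := by
          simp [pvStepA, hch]
        rw [List.foldl_cons, hs, ih]
        simp [hch]

-- A's state machine from the start: name = chars before the first ']' minus '[',
-- contents = chars after the first ']' minus ']'
theorem pv_stepA_false (cs : List Char) : ∀ (n c : List Char),
    cs.foldl pvStepA (n, c, false) =
      (n ++ (cs.takeWhile (· ≠ ']')).filter (· ≠ '['),
       c ++ ((cs.dropWhile (· ≠ ']')).drop 1).filter (· ≠ ']'),
       cs.any (· = ']')) := by
  induction cs with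
  | nil => intro n c; simp
  | cons ch t ih =>
      intro n c
      by_cases hch : ch = ']'
      · subst hch
        have hs : pvStepA (n, c, false) ']' = (n, c, true) := by simp [pvStepA]
        rw [List.foldl_cons, hs, pv_stepA_true]
        simp [List.takeWhile, List.dropWhile]
      · by_cases hlb : ch = '['
        · subst hlb
          have hs : pvStepA (n, c, false) '[' = (n, c, false) := by simp [pvStepA]
          rw [List.foldl_cons, hs, ih]
          simp [List.takeWhile, List.dropWhile, hch]
        · have hs : pvStepA (n, c, false) ch = (n ++ [ch], c, false) := by
            simp [pvStepA, hch, hlb]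
          rw [List.foldl_cons, hs, ih]
          simp [List.takeWhile, List.dropWhile, hch, hlb]

-- the two cell parsers agree on every cell
theorem pv_cell_eq (c : List Char) :
    (String.ofList (c.foldl pvStepA ([], [], false)).1,
     String.ofList (c.foldl pvStepA ([], [], false)).2.1) = pvParseCell c := by
  rw [pv_stepA_false]
  simp [pvParseCell, pv_replace_filter]

-- the two record parsers agree on every record
theorem pv_record_eq (r : List Char) :
    ((PySem.Chars.splitOn r "{FIELD}".toList).foldl
      (fun (record : PySem.Dict String String) raw_cell =>
        let c := PySem.Chars.strip raw_cell
        if c.length = 0 then record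
        else
          let st := c.foldl pvStepA (([] : List Char), ([] : List Char), false)
          record.insert (String.ofList st.1) (String.ofList st.2.1)) PySem.Dict.empty).items
    = pvParseRecord r := by
  unfold pvParseRecord
  congr 2
  funext record raw_cell
  simp only [List.length_eq_zero_iff]
  by_cases hc : PySem.Chars.strip raw_cell = []
  · simp [hc]
  · simp only [hc, if_false]
    rw [← pv_cell_eq (PySem.Chars.strip raw_cell)]

-- the outer loop: append-if fold = filter-then-map
theorem pv_outer_eq (rs : List (List Char)) :
    rs.foldl (fun ret raw_record =>
      let r := PySem.Chars.strip raw_record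
      if r.length = 0 then ret
      else ret ++ [pvParseRecord r]) []
    = (rs.filter (fun r => PySem.Chars.strip r != [])).map
        (fun r => pvParseRecord (PySem.Chars.strip r)) := by
  have h := PySem.List.foldl_append_if (fun r => PySem.Chars.strip r != [])
      (fun r => pvParseRecord (PySem.Chars.strip r)) rs []
  simp only [List.nil_append] at h
  rw [← h]
  apply PySem.List.foldl_congr_mem
  intro ret raw_record _
  by_cases hr : PySem.Chars.strip raw_record = []
  · simp [hr]
  · simp [hr, List.length_eq_zero_iff]

-- ===== VERDICT (by name: the statement is the Claim_ definition above) =====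
theorem log_string_to_dict_list_spec : Claim_equal_log_string_to_dict_list := by
  intro log_string _ _
  unfold Spec_log_string_to_dict_list log_string_to_dict_list log_string_to_dict_list_alt
  rw [← pv_outer_eq]
  apply PySem.List.foldl_congr_mem
  intro ret raw_record _
  by_cases hr : (PySem.Chars.strip raw_record).length = 0
  · simp [hr]
  · simp only [hr, if_false]
    rw [pv_record_eq]
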